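-- pv_equiv track=rewrite | github.com/amomozer19/loto | app/routes/apostas.py | _contar_padroes
-- ===== SOURCE A (Python) =====
-- def _contar_padroes(numeros_sorteio, numeros_aposta, tamanho):
--     """Contar tuplas ou triplas que acertaram"""
--     contagem = 0
--     numerosaposta_set = set(numeros_aposta)
--     sorteio_set = set(numeros_sorteio)
--
--     sorteio_list = sorted(sorteio_set)
--
--     if tamanho == 2:
--         for i in range(len(sorteio_list)):
--             for j in range(i + 1, len(sorteio_list)):
--                 if sorteio_list[i] in numerosaposta_set and sorteio_list[j] in numerosaposta_set:
--                     contagem += 1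
--     elif tamanho == 3:
--         for i in range(len(sorteio_list)):
--             for j in range(i + 1, len(sorteio_list)):
--                 for k in range(j + 1, len(sorteio_list)):
--                     if (sorteio_list[i] in numerosaposta_set and
--                         sorteio_list[j] in numerosaposta_set and
--                         sorteio_list[k] in numerosaposta_set):
--                         contagem += 1
--
--     return contagem
-- ===== SOURCE B (Python) =====
-- def _contar_padroes(numeros_sorteio, numeros_aposta, tamanho):
--     """Contar tuplas ou triplas que acertaram"""
--     m = len(set(numeros_sorteio) & set(numeros_aposta))
--     if tamanho == 2:
--         return m * (m - 1) // 2
--     if tamanho == 3: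
--         return m * (m - 1) * (m - 2) // 6
--     return 0
-- ===== Notes on version B (the rewrite author's own statement) =====
-- stated objective: simpler
-- what changed: Replaced the nested index loops over the sorted distinct draw list by computing the intersection size m of the two sets once and returning the closed-form binomial C(m,2) or C(m,3) directly.
import Mathlib
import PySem

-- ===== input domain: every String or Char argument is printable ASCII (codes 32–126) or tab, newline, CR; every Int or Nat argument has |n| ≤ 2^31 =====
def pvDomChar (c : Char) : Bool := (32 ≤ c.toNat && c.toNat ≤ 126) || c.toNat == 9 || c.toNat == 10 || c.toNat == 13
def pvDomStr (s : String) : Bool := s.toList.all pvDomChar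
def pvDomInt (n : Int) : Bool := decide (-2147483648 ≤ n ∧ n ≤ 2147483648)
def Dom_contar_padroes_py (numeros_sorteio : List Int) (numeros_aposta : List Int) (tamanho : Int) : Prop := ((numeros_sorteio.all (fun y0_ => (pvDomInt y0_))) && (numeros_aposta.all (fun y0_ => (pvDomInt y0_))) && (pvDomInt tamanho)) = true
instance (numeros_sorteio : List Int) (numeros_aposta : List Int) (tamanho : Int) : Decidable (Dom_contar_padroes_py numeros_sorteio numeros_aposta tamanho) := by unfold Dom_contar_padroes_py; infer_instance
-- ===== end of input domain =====

-- B replaces A's nested index loops by the closed-form binomial C(m,2)/C(m,3) on the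
-- intersection size m of the two sets (simpler; not measured faster on the generated inputs).

-- ===== PORT A =====
def contar_padroes_py (numeros_sorteio : List Int) (numeros_aposta : List Int) (tamanho : Int) : Int :=
  let numerosaposta_set := PySem.Set.ofList numeros_aposta
  let sorteio_set := PySem.Set.ofList numeros_sorteio
  let sorteio_list := PySem.List.sorted sorteio_set (fun x => x)
  if tamanho = 2 then
    (PySem.List.pyRange 0 (PySem.List.len sorteio_list)).foldl (fun contagem i =>
      (PySem.List.pyRange (i + 1) (PySem.List.len sorteio_list)).foldl (fun contagem j =>
        if PySem.Set.contains numerosaposta_set (PySem.List.pyGetD sorteio_list i 0) &&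
           PySem.Set.contains numerosaposta_set (PySem.List.pyGetD sorteio_list j 0)
        then contagem + 1 else contagem) contagem) 0
  else if tamanho = 3 then
    (PySem.List.pyRange 0 (PySem.List.len sorteio_list)).foldl (fun contagem i =>
      (PySem.List.pyRange (i + 1) (PySem.List.len sorteio_list)).foldl (fun contagem j =>
        (PySem.List.pyRange (j + 1) (PySem.List.len sorteio_list)).foldl (fun contagem k =>
          if PySem.Set.contains numerosaposta_set (PySem.List.pyGetD sorteio_list i 0) &&
             PySem.Set.contains numerosaposta_set (PySem.List.pyGetD sorteio_list j 0) &&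
             PySem.Set.contains numerosaposta_set (PySem.List.pyGetD sorteio_list k 0)
          then contagem + 1 else contagem) contagem) contagem) 0
  else 0

-- ===== PORT B =====
def contar_padroes_py_alt (numeros_sorteio : List Int) (numeros_aposta : List Int) (tamanho : Int) : Int :=
  let m : Int := PySem.Set.len (PySem.Set.inter (PySem.Set.ofList numeros_sorteio) (PySem.Set.ofList numeros_aposta))
  if tamanho = 2 then PySem.Int.floordiv (m * (m - 1)) 2
  else if tamanho = 3 then PySem.Int.floordiv (m * (m - 1) * (m - 2)) 6
  else 0

-- ===== PRECONDITION & SPEC =====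
def Spec_contar_padroes_py (numeros_sorteio : List Int) (numeros_aposta : List Int) (tamanho : Int) (out : Int) : Prop := out = contar_padroes_py_alt numeros_sorteio numeros_aposta tamanho
instance (numeros_sorteio : List Int) (numeros_aposta : List Int) (tamanho : Int) (out : Int) : Decidable (Spec_contar_padroes_py numeros_sorteio numeros_aposta tamanho out) := by unfold Spec_contar_padroes_py; infer_instance

-- ===== CLAIM (what is proved, stated in full; the proofs are below) =====
def Claim_equal_contar_padroes_py : Prop := ∀ (numeros_sorteio : List Int) (numeros_aposta : List Int) (tamanho : Int), Dom_contar_padroes_py numeros_sorteio numeros_aposta tamanho → Spec_contar_padroes_py numeros_sorteio numeros_aposta tamanho (contar_padroes_py numeros_sorteio numeros_aposta tamanho)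

-- ===== LEMMAS AND PROOFS =====

/-- number of pairs i<j of positions of the list whose elements both satisfy P -/
def pvCnt2 (P : Int → Bool) : List Int → Int
  | [] => 0
  | x :: xs => (if P x then ((xs.countP P : Int)) else 0) + pvCnt2 P xs

/-- number of triples of positions whose elements all satisfy P -/
def pvCnt3 (P : Int → Bool) : List Int → Int
  | [] => 0
  | x :: xs => (if P x then pvCnt2 P xs else 0) + pvCnt3 P xs

lemma pv_foldl_count (P : Int → Bool) (q : Bool) :
    ∀ (xs : List Int) (acc : Int),
      xs.foldl (fun c x => if q && P x then c + 1 else c) acc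
        = acc + (if q then ((xs.countP P : Int)) else 0) := by
  intro xs
  induction xs with
  | nil => intro acc; simp
  | cons x xs ih =>
    intro acc
    simp only [List.foldl_cons, ih, List.countP_cons]
    cases hq : q <;> cases hp : P x <;> simp [hp] <;> push_cast <;> ring

/-- innermost loop: for k in range(a, len L): if q and P(L[k]): c += 1 -/
lemma pv_loop1 (L : List Int) (P : Int → Bool) (q : Bool) (a : Int) (ha : 0 ≤ a) (acc : Int) :
    (PySem.List.pyRange a (PySem.List.len L)).foldl
        (fun c k => if q && P (PySem.List.pyGetD L k 0) then c + 1 else c) acc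
      = acc + (if q then (((L.drop a.toNat).countP P : Int)) else 0) := by
  have h := PySem.List.foldl_pyRange_pyGetD L 0 (fun c x => if q && P x then c + 1 else c) acc ha
  simpa using h.trans (pv_foldl_count P q (L.drop a.toNat) acc)

/-- gated double loop over j<k from index a -/
lemma pv_loop2g (L : List Int) (P : Int → Bool) (q : Bool) :
    ∀ (n : Nat) (a : Int) (acc : Int), 0 ≤ a → L.length - a.toNat = n →
      (PySem.List.pyRange a (PySem.List.len L)).foldl
          (fun c j => (PySem.List.pyRange (j + 1) (PySem.List.len L)).foldl
            (fun c k => if (q && P (PySem.List.pyGetD L j 0)) && P (PySem.List.pyGetD L k 0)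
              then c + 1 else c) c) acc
        = acc + (if q then pvCnt2 P (L.drop a.toNat) else 0) := by
  intro n
  induction n with
  | zero =>
    intro a acc ha hn
    have hle : (PySem.List.len L) ≤ a := by
      simp [PySem.List.len]; omega
    have hd : L.drop a.toNat = [] := List.drop_eq_nil_of_le (by omega)
    rw [PySem.List.pyRange_one_eq_nil hle]
    simp [hd, pvCnt2]
  | succ n ih =>
    intro a acc ha hn
    have hlt : a < (PySem.List.len L) := by
      simp [PySem.List.len]; omega
    have hlt' : a.toNat < L.length := by simp [PySem.List.len] at hlt; omega
    rw [PySem.List.pyRange_one_cons hlt, List.foldl_cons]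
    rw [pv_loop1 L P (q && P (PySem.List.pyGetD L a 0)) (a + 1) (by omega) acc]
    rw [ih (a + 1) _ (by omega) (by omega)]
    have hsucc : (a + 1).toNat = a.toNat + 1 := by omega
    have hdrop : L.drop a.toNat = L[a.toNat] :: L.drop (a.toNat + 1) :=
      List.drop_eq_getElem_cons hlt'
    have hget : PySem.List.pyGetD L a 0 = L[a.toNat] :=
      PySem.List.pyGetD_eq_getElem L 0 ha (by omega)
    rw [hsucc, hdrop, hget]
    cases hq : q <;> cases hp : P (L[a.toNat]) <;> simp [pvCnt2, hp] <;> ring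

/-- the tamanho == 2 double loop -/
lemma pv_loop2 (L : List Int) (P : Int → Bool) :
    ∀ (n : Nat) (a : Int) (acc : Int), 0 ≤ a → L.length - a.toNat = n →
      (PySem.List.pyRange a (PySem.List.len L)).foldl
          (fun c i => (PySem.List.pyRange (i + 1) (PySem.List.len L)).foldl
            (fun c j => if P (PySem.List.pyGetD L i 0) && P (PySem.List.pyGetD L j 0)
              then c + 1 else c) c) acc
        = acc + pvCnt2 P (L.drop a.toNat) := by
  intro n
  induction n with
  | zero =>
    intro a acc ha hn
    have hle : (PySem.List.len L) ≤ a := by simp [PySem.List.len]; omega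
    have hd : L.drop a.toNat = [] := List.drop_eq_nil_of_le (by omega)
    rw [PySem.List.pyRange_one_eq_nil hle]
    simp [hd, pvCnt2]
  | succ n ih =>
    intro a acc ha hn
    have hlt : a < (PySem.List.len L) := by simp [PySem.List.len]; omega
    have hlt' : a.toNat < L.length := by simp [PySem.List.len] at hlt; omega
    rw [PySem.List.pyRange_one_cons hlt, List.foldl_cons]
    rw [pv_loop1 L P (P (PySem.List.pyGetD L a 0)) (a + 1) (by omega) acc]
    rw [ih (a + 1) _ (by omega) (by omega)]
    have hsucc : (a + 1).toNat = a.toNat + 1 := by omega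
    have hdrop : L.drop a.toNat = L[a.toNat] :: L.drop (a.toNat + 1) :=
      List.drop_eq_getElem_cons hlt'
    have hget : PySem.List.pyGetD L a 0 = L[a.toNat] :=
      PySem.List.pyGetD_eq_getElem L 0 ha (by omega)
    rw [hsucc, hdrop, hget]
    cases hp : P (L[a.toNat]) <;> simp [pvCnt2, hp] <;> ring

/-- the tamanho == 3 triple loop -/
lemma pv_loop3 (L : List Int) (P : Int → Bool) :
    ∀ (n : Nat) (a : Int) (acc : Int), 0 ≤ a → L.length - a.toNat = n →
      (PySem.List.pyRange a (PySem.List.len L)).foldl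
          (fun c i => (PySem.List.pyRange (i + 1) (PySem.List.len L)).foldl
            (fun c j => (PySem.List.pyRange (j + 1) (PySem.List.len L)).foldl
              (fun c k => if P (PySem.List.pyGetD L i 0) && P (PySem.List.pyGetD L j 0)
                  && P (PySem.List.pyGetD L k 0) then c + 1 else c) c) c) acc
        = acc + pvCnt3 P (L.drop a.toNat) := by
  intro n
  induction n with
  | zero =>
    intro a acc ha hn
    have hle : (PySem.List.len L) ≤ a := by simp [PySem.List.len]; omega
    have hd : L.drop a.toNat = [] := List.drop_eq_nil_of_le (by omega)
    rw [PySem.List.pyRange_one_eq_nil hle]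
    simp [hd, pvCnt3]
  | succ n ih =>
    intro a acc ha hn
    have hlt : a < (PySem.List.len L) := by simp [PySem.List.len]; omega
    have hlt' : a.toNat < L.length := by simp [PySem.List.len] at hlt; omega
    rw [PySem.List.pyRange_one_cons hlt, List.foldl_cons]
    rw [pv_loop2g L P (P (PySem.List.pyGetD L a 0)) (L.length - (a + 1).toNat) (a + 1) acc (by omega) rfl]
    rw [ih (a + 1) _ (by omega) (by omega)]
    have hsucc : (a + 1).toNat = a.toNat + 1 := by omega
    have hdrop : L.drop a.toNat = L[a.toNat] :: L.drop (a.toNat + 1) :=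
      List.drop_eq_getElem_cons hlt'
    have hget : PySem.List.pyGetD L a 0 = L[a.toNat] :=
      PySem.List.pyGetD_eq_getElem L 0 ha (by omega)
    rw [hsucc, hdrop, hget]
    cases hp : P (L[a.toNat]) <;> simp [pvCnt3, hp] <;> ring

lemma pv_cnt2_closed (P : Int → Bool) :
    ∀ (xs : List Int), 2 * pvCnt2 P xs = (xs.countP P : Int) * ((xs.countP P : Int) - 1) := by
  intro xs
  induction xs with
  | nil => simp [pvCnt2]
  | cons x xs ih =>
    simp only [pvCnt2, List.countP_cons]
    cases hp : P x <;> simp [hp] <;> push_cast <;> linear_combination ih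

lemma pv_cnt3_closed (P : Int → Bool) :
    ∀ (xs : List Int), 6 * pvCnt3 P xs
      = (xs.countP P : Int) * ((xs.countP P : Int) - 1) * ((xs.countP P : Int) - 2) := by
  intro xs
  induction xs with
  | nil => simp [pvCnt3]
  | cons x xs ih =>
    simp only [pvCnt3, List.countP_cons]
    have h2 := pv_cnt2_closed P xs
    cases hp : P x
    · simp [hp]; linear_combination ih
    · simp [hp]; push_cast; linear_combination 3 * h2 + ih

lemma pv_fdiv (d x m : Int) (hd : 0 < d) (h : d * x = m) : PySem.Int.floordiv m d = x := by
  rw [PySem.Int.floordiv_eq_ediv_of_pos hd, ← h, Int.mul_ediv_cancel_left x (by omega)]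

lemma pv_m_eq (numeros_sorteio numeros_aposta : List Int) :
    PySem.Set.len (PySem.Set.inter (PySem.Set.ofList numeros_sorteio) (PySem.Set.ofList numeros_aposta))
      = (((PySem.List.sorted (PySem.Set.ofList numeros_sorteio) (fun x => x)).countP
          (fun x => PySem.Set.contains (PySem.Set.ofList numeros_aposta) x) : Int)) := by
  have hperm := PySem.List.sorted_perm (PySem.Set.ofList numeros_sorteio) (fun x : Int => x) false
  rw [PySem.Set.len, PySem.Set.inter]
  rw [hperm.countP_eq]
  simp [List.countP_eq_length_filter]

-- ===== VERDICT (by name: the statement is the Claim_ definition above) =====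
theorem contar_padroes_py_spec : Claim_equal_contar_padroes_py := by
  intro numeros_sorteio numeros_aposta tamanho _
  unfold Spec_contar_padroes_py contar_padroes_py contar_padroes_py_alt
  set L := PySem.List.sorted (PySem.Set.ofList numeros_sorteio) (fun x : Int => x) with hL
  set P : Int → Bool := fun x => PySem.Set.contains (PySem.Set.ofList numeros_aposta) x with hP
  have hm := pv_m_eq numeros_sorteio numeros_aposta
  by_cases h2 : tamanho = 2
  · simp only [h2, if_pos rfl]
    rw [pv_loop2 L P L.length 0 0 (by omega) (by omega)]
    simp only [Int.toNat_zero, List.drop_zero, zero_add]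
    rw [hm]
    exact (pv_fdiv 2 _ _ (by omega) (pv_cnt2_closed P L)).symm
  · by_cases h3 : tamanho = 3
    · simp only [h2, h3, if_neg h2, if_pos rfl]
      rw [pv_loop3 L P L.length 0 0 (by omega) (by omega)]
      simp only [Int.toNat_zero, List.drop_zero, zero_add]
      rw [hm]
      exact (pv_fdiv 6 _ _ (by omega) (pv_cnt3_closed P L)).symm
    · simp [h2, h3]
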